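-- pv_equiv track=rewrite | github.com/Kawser-nerd/CLCDSA | Source Codes/CodeJamData/17/43/17.py | findhor
-- ===== SOURCE A (Python) =====
-- def findhor(a,i):
--     seen=False
--     k=i
--     vis = True
--     for j in range(i + 1, len(a)):
--         if (a[j] == '|' or a[j] == '-') and vis:
--             if seen:
--                 return i
--             k=j
--             seen=True
--         if a[j] == '#':
--             vis = False
--     vis = True
--     for j in range(i - 1, -1, -1):
--         if (a[j] == '|' or a[j] == '-') and vis:
--             if seen:
--                 return i
--             k = j
--             seen=True
--         if a[j] == '#':
--             vis = False
--     return k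
-- ===== SOURCE B (Python) =====
-- def findhor(a, i):
--     def visible(js):
--         cs = [a[j] for j in js]
--         cut = cs.index('#') if '#' in cs else len(cs)
--         return [j for j, c in zip(js[:cut], cs[:cut]) if c == '|' or c == '-']
--     ms = visible(list(range(i + 1, len(a)))) + visible(list(range(i - 1, -1, -1)))
--     return ms[0] if len(ms) == 1 else i
-- ===== Notes on version B (the rewrite author's own statement) =====
-- stated objective: alternative
-- what changed: Replaces A's mutable seen/vis flag machine with cross-loop early returns by a declarative staged pipeline: per direction it materialises the characters, truncates at the first '#' via index, filters out the marker positions, concatenates both directions and returns the single element if the combined list has length one, else i.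
import Mathlib
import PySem

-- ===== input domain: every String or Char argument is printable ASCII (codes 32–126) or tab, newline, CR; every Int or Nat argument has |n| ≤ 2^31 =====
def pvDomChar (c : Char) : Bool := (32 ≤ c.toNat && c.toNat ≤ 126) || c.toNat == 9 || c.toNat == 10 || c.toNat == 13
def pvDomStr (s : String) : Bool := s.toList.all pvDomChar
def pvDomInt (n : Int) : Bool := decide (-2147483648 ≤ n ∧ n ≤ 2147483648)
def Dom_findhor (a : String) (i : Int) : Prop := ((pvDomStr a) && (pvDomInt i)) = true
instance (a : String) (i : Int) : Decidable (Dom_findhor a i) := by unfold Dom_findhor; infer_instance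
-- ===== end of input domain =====

-- B replaces A's mutable seen/vis flag machine (early returns spanning both loops) with a staged
-- pipeline per direction: materialise characters, cut at the first '#' via index, filter marker
-- positions, concatenate both directions and decide by the length; objective: alternative.

-- ===== PORT A =====
-- one loop body of A, shared by both `for` loops: state (seen, k, vis); `none` = early `return i`.
def pvLoopA (l : List Char) (js : List Int) (seen : Bool) (k : Int) (vis : Bool) :
    Option (Bool × Int) :=
  match js with
  | [] => some (seen, k)
  | j :: rest =>
    let c := (PySem.List.pyGet? l j).getD ' '   -- a[j]; out-of-range (IndexError) excluded by Pre_
    if (c = '|' || c = '-') && vis then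
      if seen then none
      else pvLoopA l rest true j (if c = '#' then false else vis)
    else pvLoopA l rest seen k (if c = '#' then false else vis)

def findhor (a : String) (i : Int) : Int :=
  match pvLoopA a.toList (PySem.List.pyRange (i + 1) a.toList.length 1) false i true with
  | none => i
  | some (seen, k) =>
    match pvLoopA a.toList (PySem.List.pyRange (i - 1) (-1) (-1)) seen k true with
    | none => i
    | some (_, k') => k'

-- ===== PORT B =====
-- Source B's `visible`: chars of js, cut at the first '#' (via index), filter marker positions.
def pvVis (l : List Char) (js : List Int) : List Int :=
  let cs := js.map (fun j => (PySem.List.pyGet? l j).getD ' ')  -- a[j]; out-of-range excluded by Pre_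
  let cut := if '#' ∈ cs then (PySem.List.index? cs '#').getD cs.length else cs.length
  ((js.take cut).zip (cs.take cut)).filterMap
    (fun p => if p.2 = '|' || p.2 = '-' then some p.1 else none)

def findhor_alt (a : String) (i : Int) : Int :=
  let ms := pvVis a.toList (PySem.List.pyRange (i + 1) a.toList.length 1) ++
            pvVis a.toList (PySem.List.pyRange (i - 1) (-1) (-1))
  if ms.length = 1 then (PySem.List.pyGet? ms 0).getD i else i

-- ===== PRECONDITION & SPEC =====
-- exactly the inputs on which Python A returns (outside, a[j] raises IndexError)
def Pre_findhor (a : String) (i : Int) : Prop :=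
  -((a.toList.length : Int)) - 1 ≤ i ∧ i ≤ (a.toList.length : Int)
instance (a : String) (i : Int) : Decidable (Pre_findhor a i) := by
  unfold Pre_findhor; infer_instance
def pvWitness_findhor : String × Int := ("|#-", 1)

def Spec_findhor (a : String) (i : Int) (out : Int) : Prop := out = findhor_alt a i
instance (a : String) (i : Int) (out : Int) : Decidable (Spec_findhor a i out) := by
  unfold Spec_findhor; infer_instance

-- ===== CLAIM (what is proved, stated in full; the proofs are below) =====
def Claim_equal_findhor : Prop :=
  ∀ (a : String) (i : Int), Dom_findhor a i → Pre_findhor a i → Spec_findhor a i (findhor a i)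

-- ===== LEMMAS AND PROOFS =====

-- abstraction: the marker positions in js occurring before the first '#'
def pvMarkers (l : List Char) (js : List Int) : List Int :=
  match js with
  | [] => []
  | j :: rest =>
    let c := (PySem.List.pyGet? l j).getD ' '
    if c = '#' then []
    else if c = '|' || c = '-' then j :: pvMarkers l rest
    else pvMarkers l rest

-- cut position: first '#' if any, else the whole list (proof-side name for B's inline `cut`)
def pvCut (cs : List Char) : Nat :=
  if '#' ∈ cs then (PySem.List.index? cs '#').getD cs.length else cs.length

theorem pvCut_cons_hash (cs : List Char) : pvCut ('#' :: cs) = 0 := by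
  unfold pvCut
  rw [PySem.List.index?_cons_self]
  simp

theorem pvCut_cons_of_ne {c : Char} (cs : List Char) (hc : c ≠ '#') :
    pvCut (c :: cs) = pvCut cs + 1 := by
  unfold pvCut
  rw [PySem.List.index?_cons_of_ne cs hc]
  by_cases hm : '#' ∈ cs
  · rcases Option.isSome_iff_exists.mp ((PySem.List.index?_isSome_iff cs '#').mpr hm) with ⟨k, hk⟩
    rw [hk]
    simp [hm, Ne.symm hc]
  · rw [(PySem.List.index?_eq_none_iff cs '#').mpr hm]
    simp [hm, Ne.symm hc]

theorem pvVis_eq (l : List Char) (js : List Int) : pvVis l js = pvMarkers l js := by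
  induction js with
  | nil => simp [pvVis, pvMarkers]
  | cons j rest ih =>
    show (((j :: rest).take (pvCut ((j :: rest).map _))).zip
        (((j :: rest).map _).take (pvCut ((j :: rest).map _)))).filterMap _ = _
    rw [List.map_cons]
    by_cases hh : ((PySem.List.pyGet? l j).getD ' ') = '#'
    · rw [hh, pvCut_cons_hash]
      simp [pvMarkers, hh]
    · rw [pvCut_cons_of_ne _ hh, List.take_succ_cons, List.take_succ_cons,
        List.zip_cons_cons]
      have ih' : (((rest.take (pvCut (rest.map fun j => (PySem.List.pyGet? l j).getD ' '))).zip
          ((rest.map fun j => (PySem.List.pyGet? l j).getD ' ').take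
            (pvCut (rest.map fun j => (PySem.List.pyGet? l j).getD ' ')))).filterMap
          (fun p => if p.2 = '|' || p.2 = '-' then some p.1 else none)) = pvMarkers l rest := ih
      by_cases hmk : ((decide ((PySem.List.pyGet? l j).getD ' ' = '|') ||
          decide ((PySem.List.pyGet? l j).getD ' ' = '-')) = true)
      · simp only [List.filterMap_cons, hmk, if_true, pvMarkers, hh, if_false]
        rw [ih']
      · rw [Bool.not_eq_true] at hmk
        simp only [List.filterMap_cons, hmk, Bool.false_eq_true, if_false, pvMarkers, hh]
        rw [ih']

theorem pvLoopA_invis (l : List Char) (js : List Int) :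
    ∀ (seen : Bool) (k : Int), pvLoopA l js seen k false = some (seen, k) := by
  induction js with
  | nil => intro seen k; simp [pvLoopA]
  | cons j rest ih =>
    intro seen k
    simp [pvLoopA, ih]

theorem pvLoopA_eq (l : List Char) (js : List Int) :
    ∀ (seen : Bool) (k : Int),
      pvLoopA l js seen k true =
        match pvMarkers l js with
        | [] => some (seen, k)
        | [m] => if seen then none else some (true, m)
        | _ :: _ :: _ => none := by
  induction js with
  | nil => intro seen k; simp [pvLoopA, pvMarkers]
  | cons j rest ih =>
    intro seen k
    simp only [pvLoopA, pvMarkers, Bool.and_true]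
    by_cases hh : ((PySem.List.pyGet? l j).getD ' ') = '#'
    · simp [hh, pvLoopA_invis]
    · by_cases hmk : ((decide ((PySem.List.pyGet? l j).getD ' ' = '|') ||
          decide ((PySem.List.pyGet? l j).getD ' ' = '-')) : Bool) = true
      · rw [if_pos hmk, if_pos hmk]
        cases seen with
        | true =>
          rcases pvMarkers l rest with _ | ⟨h, _ | ⟨h', t⟩⟩ <;> simp [hh]
        | false =>
          rw [if_neg (by simp), if_neg hh, ih]
          rcases pvMarkers l rest with _ | ⟨h, _ | ⟨h', t⟩⟩ <;> simp [hh]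
      · rw [Bool.not_eq_true] at hmk
        simp [hmk, hh, ih]

-- ===== VERDICT (by name: the statement is the Claim_ definition above) =====
theorem findhor_spec : Claim_equal_findhor := by
  intro a i _ _
  unfold Spec_findhor findhor findhor_alt
  simp only [pvLoopA_eq, pvVis_eq]
  rcases h1 : pvMarkers a.toList (PySem.List.pyRange (i + 1) a.toList.length 1) with
    _ | ⟨m1, _ | ⟨m1', t1⟩⟩ <;>
  rcases h2 : pvMarkers a.toList (PySem.List.pyRange (i - 1) (-1) (-1)) with
    _ | ⟨m2, _ | ⟨m2', t2⟩⟩ <;>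
  simp [PySem.List.pyGet?, PySem.List.pyIdx?]
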